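-- pv_equiv track=rewrite | github.com/chengwuzi/dataProcessCode | dataProcess/1-demo.py | bucketize
-- ===== SOURCE A (Python) =====
-- def bucketize(values, buckets):
--     """
--     buckets: list of tuples (label, lo, hi, lo_inclusive, hi_inclusive)
--     hi can be None meaning +inf
--     """
--     counts = {b[0]: 0 for b in buckets}
--     for v in values:
--         for label, lo, hi, lo_inc, hi_inc in buckets:
--             if hi is None:
--                 ok_hi = True
--             else:
--                 ok_hi = (v <= hi) if hi_inc else (v < hi)
--
--             ok_lo = (v >= lo) if lo_inc else (v > lo)
--
--             if ok_lo and ok_hi: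
--                 counts[label] += 1
--                 break
--     return counts
-- ===== SOURCE B (Python) =====
-- def _in_bucket(v, lo, hi, lo_inc, hi_inc):
--     """True iff v lies in the interval (lo, hi) with the given inclusivities; hi=None means +inf."""
--     if not (v > lo or (lo_inc and v == lo)):
--         return False
--     if hi is None:
--         return True
--     return v < hi or (hi_inc and v == hi)
--
--
-- def bucketize(values, buckets):
--     """
--     buckets: list of tuples (label, lo, hi, lo_inclusive, hi_inclusive)
--     hi can be None meaning +inf
--     """
--     counts = {b[0]: 0 for b in buckets}
--     remaining = list(values)
--     for label, lo, hi, lo_inc, hi_inc in buckets: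
--         matched = [v for v in remaining if _in_bucket(v, lo, hi, lo_inc, hi_inc)]
--         remaining = [v for v in remaining if not _in_bucket(v, lo, hi, lo_inc, hi_inc)]
--         counts[label] += len(matched)
--     return counts
-- ===== Notes on version B (the rewrite author's own statement) =====
-- stated objective: alternative
-- what changed: B inverts the nesting to bucket-major: it keeps a shrinking pool of still-unmatched values, partitions the pool at each bucket in order and adds the matched count at once, instead of A's per-value scan over buckets with a break.
import Mathlib
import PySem

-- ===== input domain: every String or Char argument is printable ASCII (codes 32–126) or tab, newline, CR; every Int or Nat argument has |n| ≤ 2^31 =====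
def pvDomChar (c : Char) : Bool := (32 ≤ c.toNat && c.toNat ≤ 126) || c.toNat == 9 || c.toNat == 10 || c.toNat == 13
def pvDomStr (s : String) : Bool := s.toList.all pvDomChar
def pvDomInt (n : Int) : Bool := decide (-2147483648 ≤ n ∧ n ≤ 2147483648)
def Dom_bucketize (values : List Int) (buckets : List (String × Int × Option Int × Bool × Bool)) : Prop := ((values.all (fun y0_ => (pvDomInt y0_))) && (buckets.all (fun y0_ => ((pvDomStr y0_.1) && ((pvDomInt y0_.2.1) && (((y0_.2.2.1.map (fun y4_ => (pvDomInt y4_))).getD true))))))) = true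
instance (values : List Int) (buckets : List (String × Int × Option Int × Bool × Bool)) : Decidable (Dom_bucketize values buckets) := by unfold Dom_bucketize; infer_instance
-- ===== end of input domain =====

-- B replaces A's value-major scan (per value, scan buckets, break on first match) by a
-- bucket-major pass over a shrinking pool of still-unmatched values; same cost, different structure.

-- ===== PORT A =====
-- inner 'for label, lo, hi, lo_inc, hi_inc in buckets: … break' loop of A
def pvAInner (v : Int) : List (String × Int × Option Int × Bool × Bool) → PySem.Dict String Int → PySem.Dict String Int
  | [], d => d
  | (label, lo, hi, loInc, hiInc) :: rest, d =>
    let okHi : Bool := match hi with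
      | none => true
      | some h => if hiInc then decide (v ≤ h) else decide (v < h)
    let okLo : Bool := if loInc then decide (lo ≤ v) else decide (lo < v)
    if okLo && okHi then d.modify label 0 (· + 1) else pvAInner v rest d

def bucketize (values : List Int) (buckets : List (String × Int × Option Int × Bool × Bool)) : List (String × Int) :=
  let counts : PySem.Dict String Int := buckets.foldl (fun d b => d.insert b.1 0) PySem.Dict.empty
  (values.foldl (fun d v => pvAInner v buckets d) counts).items

-- ===== PORT B =====
-- B's helper _in_bucket(v, lo, hi, lo_inc, hi_inc)
def pvBMatch (v : Int) (lo : Int) (hi : Option Int) (loInc hiInc : Bool) : Bool :=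
  if !(decide (lo < v) || (loInc && decide (v = lo))) then false
  else match hi with
    | none => true
    | some h => decide (v < h) || (hiInc && decide (v = h))

-- B's outer loop: buckets in order against the shrinking pool 'remaining'
def pvBGo : List (String × Int × Option Int × Bool × Bool) → PySem.Dict String Int → List Int → PySem.Dict String Int
  | [], d, _ => d
  | (label, lo, hi, loInc, hiInc) :: rest, d, remaining =>
    let matched := remaining.filter (fun v => pvBMatch v lo hi loInc hiInc)
    let remaining' := remaining.filter (fun v => !pvBMatch v lo hi loInc hiInc)
    pvBGo rest (d.modify label 0 (· + (matched.length : Int))) remaining'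

def bucketize_alt (values : List Int) (buckets : List (String × Int × Option Int × Bool × Bool)) : List (String × Int) :=
  let counts : PySem.Dict String Int := buckets.foldl (fun d b => d.insert b.1 0) PySem.Dict.empty
  (pvBGo buckets counts values).items

-- ===== PRECONDITION & SPEC =====
def Spec_bucketize (values : List Int) (buckets : List (String × Int × Option Int × Bool × Bool)) (out : List (String × Int)) : Prop := out = bucketize_alt values buckets
instance (values : List Int) (buckets : List (String × Int × Option Int × Bool × Bool)) (out : List (String × Int)) : Decidable (Spec_bucketize values buckets out) := by unfold Spec_bucketize; infer_instance

-- ===== CLAIM (what is proved, stated in full; the proofs are below) =====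
def Claim_equal_bucketize : Prop := ∀ (values : List Int) (buckets : List (String × Int × Option Int × Bool × Bool)), Dom_bucketize values buckets → Spec_bucketize values buckets (bucketize values buckets)

-- ===== LEMMAS AND PROOFS =====

-- label of the first bucket matching v (none if no bucket matches)
def pvFM (v : Int) : List (String × Int × Option Int × Bool × Bool) → Option String
  | [] => none
  | b :: rest => if pvBMatch v b.2.1 b.2.2.1 b.2.2.2.1 b.2.2.2.2 then some b.1 else pvFM v rest

-- A's ok_lo/ok_hi test agrees with B's _in_bucket
lemma pvCond_eq (v lo : Int) (hi : Option Int) (loInc hiInc : Bool) :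
    ((if loInc then decide (lo ≤ v) else decide (lo < v)) &&
      (match hi with | none => true | some h => if hiInc then decide (v ≤ h) else decide (v < h)))
      = pvBMatch v lo hi loInc hiInc := by
  cases hi <;> cases loInc <;> cases hiInc <;>
    (rw [Bool.eq_iff_iff]; simp [pvBMatch]) <;> omega

-- how many values of vs fall (first-match) into label k
def pvCnt (bs : List (String × Int × Option Int × Bool × Bool)) (k : String) (vs : List Int) : Nat :=
  vs.countP (fun v => decide (pvFM v bs = some k))

lemma pvAInner_eq_fm (v : Int) (bs : List (String × Int × Option Int × Bool × Bool))
    (d : PySem.Dict String Int) :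
    pvAInner v bs d = match pvFM v bs with
      | some l => d.modify l 0 (· + 1)
      | none => d := by
  induction bs with
  | nil => rfl
  | cons b rest ih =>
    obtain ⟨label, lo, hi, loInc, hiInc⟩ := b
    simp only [pvAInner, pvFM, pvCond_eq]
    by_cases h : pvBMatch v lo hi loInc hiInc = true
    · simp [h]
    · simp [h, ih]

lemma pvFM_mem {v : Int} {bs : List (String × Int × Option Int × Bool × Bool)} {l : String}
    (h : pvFM v bs = some l) : l ∈ bs.map (·.1) := by
  induction bs with
  | nil => simp [pvFM] at h
  | cons b rest ih =>
    simp only [pvFM] at h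
    split at h
    · simp at h; simp [h]
    · simp [ih h]

-- A's value loop, pointwise
lemma pvA_getD (bs : List (String × Int × Option Int × Bool × Bool)) (vs : List Int)
    (d : PySem.Dict String Int) (k : String) :
    (vs.foldl (fun d v => pvAInner v bs d) d).getD k 0 = d.getD k 0 + (pvCnt bs k vs : Int) := by
  induction vs generalizing d with
  | nil => simp [pvCnt]
  | cons v vs ih =>
    simp only [List.foldl_cons]
    rw [ih, pvAInner_eq_fm]
    cases hfm : pvFM v bs with
    | none => simp [pvCnt, hfm]
    | some l =>
      rw [PySem.Dict.getD_modify]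
      simp only [pvCnt, List.countP_cons, hfm, decide_eq_true_eq, Option.some.injEq]
      by_cases hk : k = l
      · subst hk; simp; ring
      · simp [hk, Ne.symm hk]

-- splitting the first-match count at the head bucket
lemma pvCnt_cons (b : String × Int × Option Int × Bool × Bool)
    (rest : List (String × Int × Option Int × Bool × Bool)) (k : String) (vs : List Int) :
    pvCnt (b :: rest) k vs =
      (if k = b.1 then vs.countP (fun v => pvBMatch v b.2.1 b.2.2.1 b.2.2.2.1 b.2.2.2.2) else 0) +
      pvCnt rest k (vs.filter (fun v => !pvBMatch v b.2.1 b.2.2.1 b.2.2.2.1 b.2.2.2.2)) := by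
  induction vs with
  | nil => simp [pvCnt]
  | cons v vs ih =>
    by_cases hm : pvBMatch v b.2.1 b.2.2.1 b.2.2.2.1 b.2.2.2.2 = true
    · have hfm : pvFM v (b :: rest) = some b.1 := by simp [pvFM, hm]
      simp only [pvCnt, List.countP_cons, List.filter_cons, hm, hfm, Bool.not_true,
        decide_eq_true_eq, Option.some.injEq] at ih ⊢
      by_cases hk : k = b.1
      · subst hk; simp only [eq_comm, if_true] at ih ⊢; simp at ih ⊢; omega
      · simp [hk, Ne.symm hk] at ih ⊢; omega
    · have hfm : pvFM v (b :: rest) = pvFM v rest := by simp [pvFM, hm]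
      simp only [Bool.not_eq_true] at hm
      simp only [pvCnt, List.countP_cons, List.filter_cons, hm, hfm, Bool.not_false,
        decide_eq_true_eq, if_true] at ih ⊢
      by_cases hk : k = b.1 <;> simp [hk] at ih ⊢ <;> omega

-- B's bucket loop, pointwise
lemma pvB_getD (bs : List (String × Int × Option Int × Bool × Bool))
    (d : PySem.Dict String Int) (vs : List Int) (k : String) :
    (pvBGo bs d vs).getD k 0 = d.getD k 0 + (pvCnt bs k vs : Int) := by
  induction bs generalizing d vs with
  | nil => simp [pvBGo, pvCnt, pvFM]
  | cons b rest ih =>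
    obtain ⟨label, lo, hi, loInc, hiInc⟩ := b
    simp only [pvBGo]
    rw [ih, PySem.Dict.getD_modify, pvCnt_cons]
    simp only [List.countP_eq_length_filter]
    by_cases hk : k = label
    · subst hk; simp; ring
    · simp [hk]

-- keys bookkeeping --------------------------------------------------------

lemma pvAInner_keys (v : Int) (bs : List (String × Int × Option Int × Bool × Bool))
    (d : PySem.Dict String Int) (h : ∀ l ∈ bs.map (·.1), l ∈ d.keys) :
    (pvAInner v bs d).keys = d.keys := by
  rw [pvAInner_eq_fm]
  cases hfm : pvFM v bs with
  | none => rfl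
  | some l =>
    have hl : d.contains l = true := (PySem.Dict.contains_iff_mem_keys d l).mpr (h l (pvFM_mem hfm))
    simp [PySem.Dict.keys_modify, PySem.Dict.keys_insert_of_contains _ _ hl]

lemma pvA_keys (bs : List (String × Int × Option Int × Bool × Bool)) (vs : List Int)
    (d : PySem.Dict String Int) (h : ∀ l ∈ bs.map (·.1), l ∈ d.keys) :
    (vs.foldl (fun d v => pvAInner v bs d) d).keys = d.keys := by
  induction vs generalizing d with
  | nil => rfl
  | cons v vs ih =>
    simp only [List.foldl_cons]
    rw [ih, pvAInner_keys v bs d h]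
    intro l hl
    rw [pvAInner_keys v bs d h]
    exact h l hl

lemma pvB_keys (bs : List (String × Int × Option Int × Bool × Bool))
    (d : PySem.Dict String Int) (vs : List Int) (h : ∀ l ∈ bs.map (·.1), l ∈ d.keys) :
    (pvBGo bs d vs).keys = d.keys := by
  induction bs generalizing d vs with
  | nil => rfl
  | cons b rest ih =>
    obtain ⟨label, lo, hi, loInc, hiInc⟩ := b
    have hlab : d.contains label = true :=
      (PySem.Dict.contains_iff_mem_keys d label).mpr (h label (by simp))
    have hkeys : (d.modify label 0 (· + (((vs.filter (fun v => pvBMatch v lo hi loInc hiInc)).length : Int)))).keys = d.keys := by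
      simp [PySem.Dict.keys_modify, PySem.Dict.keys_insert_of_contains _ _ hlab]
    simp only [pvBGo]
    rw [ih _ _ (by rw [hkeys]; intro l hl; exact h l (by simp at hl ⊢; exact .inr hl)), hkeys]

lemma pvCounts_mem (bs : List (String × Int × Option Int × Bool × Bool))
    (d : PySem.Dict String Int) (l : String)
    (h : l ∈ bs.map (·.1) ∨ l ∈ d.keys) :
    l ∈ (bs.foldl (fun d b => d.insert b.1 0) d).keys := by
  induction bs generalizing d with
  | nil => simpa using h
  | cons b rest ih =>
    simp only [List.foldl_cons]
    apply ih
    rcases h with h | h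
    · simp only [List.map_cons, List.mem_cons] at h
      rcases h with h | h
      · right; rw [PySem.Dict.mem_keys_insert]; exact .inl h
      · exact .inl h
    · right; rw [PySem.Dict.mem_keys_insert]; exact .inr h

lemma pvCounts_nodup (bs : List (String × Int × Option Int × Bool × Bool))
    (d : PySem.Dict String Int) (h : d.keys.Nodup) :
    (bs.foldl (fun d b => d.insert b.1 0) d).keys.Nodup := by
  induction bs generalizing d with
  | nil => exact h
  | cons b rest ih => exact ih _ (PySem.Dict.nodup_keys_insert _ _ _ h)

-- ===== VERDICT (by name: the statement is the Claim_ definition above) =====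
theorem bucketize_spec : Claim_equal_bucketize := by
  intro values buckets _
  unfold Spec_bucketize bucketize bucketize_alt
  set counts : PySem.Dict String Int := buckets.foldl (fun d b => d.insert b.1 0) PySem.Dict.empty with hc
  have hmem : ∀ l ∈ buckets.map (·.1), l ∈ counts.keys := by
    intro l hl
    exact pvCounts_mem buckets PySem.Dict.empty l (.inl hl)
  have hnd : counts.keys.Nodup := pvCounts_nodup buckets _ PySem.Dict.nodup_keys_empty
  have hkA : (values.foldl (fun d v => pvAInner v buckets d) counts).keys = counts.keys :=
    pvA_keys buckets values counts hmem
  have hkB : (pvBGo buckets counts values).keys = counts.keys :=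
    pvB_keys buckets counts values hmem
  rw [PySem.Dict.items_eq_map_keys _ (by rw [hkA]; exact hnd) 0,
      PySem.Dict.items_eq_map_keys _ (by rw [hkB]; exact hnd) 0, hkA, hkB]
  apply List.map_congr_left
  intro k _
  rw [pvA_getD, pvB_getD]
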